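-- pv_equiv track=rewrite | github.com/asweigart/programmedpatterns | python/programmedpatterns/__init__.py | vis4
-- ===== SOURCE A (Python) =====
-- def vis4(n):  # DONE
--     """
--     O.O  O...O  O.....O
--     .O   .O.O   .O...O
--     O.O  ..O    ..O.O
--          .O.O   ...O
--          O...O  ..O.O
--                 .O...O
--                 O.....O
--     Number of Os:
--     5    9      13"""
--     result = ''
--     for i in range(n):
--         result += '.' * i
--         result += 'O'
--         result += '.' * (2 * (n - 1 - i) + 1)
--         result += 'O\n'
--
--     result += ('.' * n) + 'O\n'
--
--     for i in range(n - 1, -1, -1):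
--         result += '.' * i
--         result += 'O'
--         result += '.' * (2 * (n - 1 - i) + 1)
--         result += 'O\n'
--
--     return result.rstrip()
-- ===== SOURCE B (Python) =====
-- def vis4(n):
--     # grow the figure from the innermost 'O' outward, sandwiching one ring per step;
--     # indentation is deferred: a line born in ring k finally carries n - k leading dots
--     lines = [(0, 'O')]
--     for k in range(1, n + 1):
--         edge = (k, 'O' + '.' * (2 * k - 1) + 'O')
--         lines = [edge] + lines + [edge]
--     return '\n'.join('.' * (n - k) + s for k, s in lines)
-- ===== Notes on version B (the rewrite author's own statement) =====
-- stated objective: alternative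
-- what changed: A computes each row from a closed-form dot/O formula in two symmetric index loops plus a middle line and rstrips a trailing newline; B builds the figure inside-out, starting from the single central 'O' and sandwiching one ring per step, deferring each line's indentation (n - ring) to the final join.
import Mathlib
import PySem

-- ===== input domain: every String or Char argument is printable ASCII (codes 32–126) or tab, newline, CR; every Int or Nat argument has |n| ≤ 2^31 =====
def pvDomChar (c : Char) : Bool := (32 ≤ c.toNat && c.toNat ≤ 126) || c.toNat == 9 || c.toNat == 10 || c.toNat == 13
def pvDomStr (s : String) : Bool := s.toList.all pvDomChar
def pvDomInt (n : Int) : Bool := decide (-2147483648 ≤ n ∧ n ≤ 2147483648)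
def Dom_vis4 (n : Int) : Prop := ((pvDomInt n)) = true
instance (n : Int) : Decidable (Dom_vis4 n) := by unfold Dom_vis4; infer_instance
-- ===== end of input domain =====

-- B builds the figure inside-out: it starts from the innermost 'O', sandwiches one ring
-- (edge line above and below) per step and indents each line by n - ring at the final
-- join, instead of A's two closed-form row loops + middle line + rstrip (alternative).

-- '.' * i
def pvDots (i : Int) : List Char := PySem.List.pyRepeat ['.'] i

-- ===== PORT A =====
def vis4 (n : Int) : String :=
  let result : List Char :=
    (PySem.List.pyRange 0 n 1).foldl
      (fun r i => r ++ pvDots i ++ ['O'] ++ pvDots (2 * (n - 1 - i) + 1) ++ ['O', '\n']) []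
  let result := result ++ pvDots n ++ ['O', '\n']
  let result :=
    (PySem.List.pyRange (n - 1) (-1) (-1)).foldl
      (fun r i => r ++ pvDots i ++ ['O'] ++ pvDots (2 * (n - 1 - i) + 1) ++ ['O', '\n']) result
  String.ofList (PySem.Chars.rstrip result)

-- ===== PORT B =====
def vis4_alt (n : Int) : String :=
  let lines : List (Int × List Char) :=
    (PySem.List.pyRange 1 (n + 1) 1).foldl
      (fun lines k =>
        let edge := (k, ['O'] ++ PySem.List.pyRepeat ['.'] (2 * k - 1) ++ ['O'])
        [edge] ++ lines ++ [edge])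
      [(0, ['O'])]
  String.ofList (PySem.Chars.join ['\n']
    (lines.map (fun kl => PySem.List.pyRepeat ['.'] (n - kl.1) ++ kl.2)))

-- ===== PRECONDITION & SPEC =====
def Spec_vis4 (n : Int) (out : String) : Prop := out = vis4_alt n
instance (n : Int) (out : String) : Decidable (Spec_vis4 n out) := by unfold Spec_vis4; infer_instance

-- ===== CLAIM (what is proved, stated in full; the proofs are below) =====
def Claim_equal_vis4 : Prop := ∀ (n : Int), Dom_vis4 n → Spec_vis4 n (vis4 n)

-- ===== LEMMAS AND PROOFS =====

-- proof-side vocabulary: the figure as a list of lines, in Nat form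
def pvEdgeN (k : Nat) : List Char := ['O'] ++ List.replicate (2 * k - 1) '.' ++ ['O']
def pvRowN (m k : Nat) : List Char :=
  List.replicate k '.' ++ ['O'] ++ List.replicate (2 * (m - 1 - k) + 1) '.' ++ ['O']
def pvMidN (m : Nat) : List Char := List.replicate m '.' ++ ['O']
def pvRowsN (m : Nat) : List (List Char) := (List.range m).map (pvRowN m)
-- the onion view: linesN (m+1) wraps a ring around linesN m
def pvLinesN : Nat → List (List Char)
  | 0 => [['O']]
  | m + 1 => [pvEdgeN (m + 1)] ++ (pvLinesN m).map (fun l => ['.'] ++ l) ++ [pvEdgeN (m + 1)]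

-- flatten of per-line '\n'-terminated rows = '\n'-join of the rows plus one trailing '\n'
theorem pv_flat_join (y : List Char) (t : List (List Char)) :
    ((y :: t).map (fun l => l ++ ['\n'])).flatten = PySem.Chars.join ['\n'] (y :: t) ++ ['\n'] := by
  induction t generalizing y with
  | nil => simp [PySem.Chars.join_singleton]
  | cons z t ih =>
      rw [PySem.Chars.join_cons_cons]
      simp only [List.map_cons, List.flatten_cons] at *
      rw [ih z]
      simp

-- a '\n'-join of rows each ending in 'O' itself ends in 'O'
theorem pv_join_ends (t : List (List Char)) (y : List Char)
    (h : ∀ l ∈ y :: t, ∃ w, l = w ++ ['O']) :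
    ∃ w, PySem.Chars.join ['\n'] (y :: t) = w ++ ['O'] := by
  induction t generalizing y with
  | nil =>
      simpa [PySem.Chars.join_singleton] using h y (by simp)
  | cons z t ih =>
      obtain ⟨w, hw⟩ := ih z (fun l hl => h l (by simp at hl ⊢; tauto))
      exact ⟨y ++ ['\n'] ++ w, by rw [PySem.Chars.join_cons_cons, hw]; simp⟩

-- rstrip of (something ending in 'O') ++ '\n'
theorem pv_rstrip_ON (w : List Char) :
    PySem.Chars.rstrip (w ++ ['O'] ++ ['\n']) = w ++ ['O'] := by
  have h1 : PySem.Chars.isspace '\n' = true := by decide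
  have h2 : PySem.Chars.isspace 'O' = false := by decide
  simp [PySem.Chars.rstrip, List.dropWhile, h1, h2]

-- the assembled '\n'-terminated body, rstripped, equals the '\n'-join of the same rows
theorem pv_assemble (rows : List (List Char)) (w : List Char)
    (hr : ∀ l ∈ rows, ∃ u, l = u ++ ['O']) :
    PySem.Chars.rstrip ((rows.map (fun l => l ++ ['\n'])).flatten ++ w ++ ['O', '\n']
        ++ (rows.reverse.map (fun l => l ++ ['\n'])).flatten)
      = PySem.Chars.join ['\n'] (rows ++ [w ++ ['O']] ++ rows.reverse) := by
  have hL : rows ++ [w ++ ['O']] ++ rows.reverse ≠ [] := by simp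
  obtain ⟨y, t, hyt⟩ := List.exists_cons_of_ne_nil hL
  have h1 : (rows.map (fun l => l ++ ['\n'])).flatten ++ w ++ ['O', '\n']
        ++ (rows.reverse.map (fun l => l ++ ['\n'])).flatten
      = ((rows ++ [w ++ ['O']] ++ rows.reverse).map (fun l => l ++ ['\n'])).flatten := by
    simp [List.append_assoc]
  rw [h1, hyt, pv_flat_join]
  obtain ⟨u, hu⟩ := pv_join_ends t y (by
    intro l hl
    rw [← hyt] at hl
    simp only [List.mem_append, List.mem_singleton, List.mem_reverse] at hl
    rcases hl with (hl | hl) | hl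
    · exact hr l hl
    · exact ⟨w, hl⟩
    · exact hr l hl)
  rw [hu]
  exact pv_rstrip_ON u

-- A equals the '\n'-join of rows ++ [mid] ++ rows.reverse (Int-indexed rows)
theorem pv_A_join (n : Int) :
    vis4 n = String.ofList (PySem.Chars.join ['\n']
      ((PySem.List.pyRange 0 n 1).map
          (fun i => pvDots i ++ ['O'] ++ pvDots (2 * (n - 1 - i) + 1) ++ ['O'])
        ++ [pvDots n ++ ['O']]
        ++ ((PySem.List.pyRange 0 n 1).map
          (fun i => pvDots i ++ ['O'] ++ pvDots (2 * (n - 1 - i) + 1) ++ ['O'])).reverse)) := by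
  unfold vis4
  have hrev : PySem.List.pyRange (n - 1) (-1) (-1) = (PySem.List.pyRange 0 n 1).reverse := by
    have := PySem.List.pyRange_neg_one_eq_reverse (n - 1) (-1)
    simpa using this
  rw [hrev]
  set row : Int → List Char :=
    fun i => pvDots i ++ ['O'] ++ pvDots (2 * (n - 1 - i) + 1) ++ ['O'] with hrow
  have key : ∀ (L : List Int) (init : List Char),
      L.foldl (fun r i => r ++ pvDots i ++ ['O'] ++ pvDots (2 * (n - 1 - i) + 1) ++ ['O', '\n']) init
        = init ++ ((L.map row).map (fun l => l ++ ['\n'])).flatten := by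
    intro L
    induction L with
    | nil => simp
    | cons x L ih =>
        intro init
        rw [List.foldl_cons, ih]
        simp [hrow, List.append_assoc]
  simp only [key, List.nil_append]
  rw [List.map_reverse]
  refine congrArg String.ofList (pv_assemble _ (pvDots n) ?_)
  intro l hl
  obtain ⟨i, _, hi⟩ := List.mem_map.mp hl
  exact ⟨pvDots i ++ ['O'] ++ pvDots (2 * (n - 1 - i) + 1), by rw [← hi, hrow]⟩

-- the Int-indexed rows of A are pvRowsN / pvMidN at n.toNat
theorem pv_rows_nat (n : Int) (hn : 0 ≤ n) :
    (PySem.List.pyRange 0 n 1).map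
        (fun i => pvDots i ++ ['O'] ++ pvDots (2 * (n - 1 - i) + 1) ++ ['O'])
      = pvRowsN n.toNat := by
  rw [PySem.List.pyRange_one, pvRowsN]
  simp only [Int.sub_zero, List.map_map]
  refine List.map_congr_left ?_
  intro k hk
  have hk' : k < n.toNat := by simpa using hk
  simp only [Function.comp, pvDots, pvRowN, Int.zero_add,
    PySem.List.pyRepeat_singleton, Int.toNat_natCast]
  have h2 : (2 * (n - 1 - (k : Int)) + 1).toNat = 2 * (n.toNat - 1 - k) + 1 := by omega
  rw [h2]

theorem pv_mid_nat (n : Int) : pvDots n ++ ['O'] = pvMidN n.toNat := by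
  simp [pvDots, pvMidN, PySem.List.pyRepeat_singleton]

-- the row/middle/mirror view of the figure IS the onion view
theorem pv_rows_eq_lines (m : Nat) :
    pvRowsN m ++ [pvMidN m] ++ (pvRowsN m).reverse = pvLinesN m := by
  induction m with
  | zero => simp [pvRowsN, pvMidN, pvLinesN]
  | succ m ih =>
      have hrows : pvRowsN (m + 1) = pvEdgeN (m + 1) :: (pvRowsN m).map (fun l => ['.'] ++ l) := by
        have h0 : pvRowN (m + 1) 0 = pvEdgeN (m + 1) := by
          have he : 2 * (m + 1 - 1 - 0) + 1 = 2 * (m + 1) - 1 := by omega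
          simp [pvRowN, pvEdgeN]
          omega
        have h1 : ∀ k, pvRowN (m + 1) (k + 1) = ['.'] ++ pvRowN m k := by
          intro k
          have he : m + 1 - 1 - (k + 1) = m - 1 - k := by omega
          simp [pvRowN, List.replicate_succ]
          omega
        rw [pvRowsN, List.range_succ_eq_map, List.map_cons, List.map_map, h0]
        congr 1
        rw [pvRowsN, List.map_map]
        exact List.map_congr_left (fun k _ => by simpa [Function.comp] using h1 k)
      have hmid : pvMidN (m + 1) = ['.'] ++ pvMidN m := by
        simp [pvMidN, List.replicate_succ]
      rw [pvLinesN, ← ih, hrows, hmid]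
      simp [List.map_append, List.append_assoc]

-- the rings, with their ring numbers, as B's fold builds them
def pvRings : Nat → List (Int × List Char)
  | 0 => [(0, ['O'])]
  | m + 1 => [((m : Int) + 1, pvEdgeN (m + 1))] ++ pvRings m ++ [((m : Int) + 1, pvEdgeN (m + 1))]

theorem pv_rings_bound (m : Nat) : ∀ kl ∈ pvRings m, 0 ≤ kl.1 ∧ kl.1 ≤ (m : Int) := by
  induction m with
  | zero => simp [pvRings]
  | succ m ih =>
      intro kl hkl
      simp only [pvRings, List.mem_append, List.mem_singleton] at hkl
      rcases hkl with (h | h) | h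
      · subst h; constructor <;> [positivity; omega]
      · have := ih kl h; push_cast; omega
      · subst h; constructor <;> [positivity; omega]

-- indenting ring (m, line) by m - ring recovers the dot-prepend onion view
theorem pv_map_rings (m : Nat) :
    (pvRings m).map (fun kl => PySem.List.pyRepeat ['.'] ((m : Int) - kl.1) ++ kl.2)
      = pvLinesN m := by
  induction m with
  | zero => simp [pvRings, pvLinesN, PySem.List.pyRepeat_singleton]
  | succ m ih =>
      have hmid : (pvRings m).map
            (fun kl => PySem.List.pyRepeat ['.'] (((m + 1 : Nat) : Int) - kl.1) ++ kl.2)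
          = (pvLinesN m).map (fun l => ['.'] ++ l) := by
        rw [← ih, List.map_map]
        refine List.map_congr_left ?_
        intro kl hkl
        obtain ⟨h0, h1⟩ := pv_rings_bound m kl hkl
        simp only [Function.comp, PySem.List.pyRepeat_singleton]
        have he : (((m + 1 : Nat) : Int) - kl.1).toNat = ((m : Int) - kl.1).toNat + 1 := by
          push_cast; omega
        rw [he, List.replicate_succ]
        simp
      have hedge : PySem.List.pyRepeat ['.']
            (((m + 1 : Nat) : Int) - ((m : Int) + 1)) ++ pvEdgeN (m + 1) = pvEdgeN (m + 1) := by
        simp [PySem.List.pyRepeat_singleton]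
      simp only [pvRings, List.map_append, List.map_cons, List.map_nil]
      rw [hmid]
      simp only [pvLinesN]
      rw [← hedge]
      simp

-- B equals the '\n'-join of the onion view
theorem pv_B_join (n : Int) :
    vis4_alt n = String.ofList (PySem.Chars.join ['\n'] (pvLinesN n.toNat)) := by
  unfold vis4_alt
  by_cases hn : n < 0
  · have hle : n + 1 ≤ 1 := by omega
    rw [PySem.List.pyRange_one_eq_nil hle]
    show String.ofList (PySem.Chars.join ['\n']
        (([((0 : Int), ['O'])]).map
          (fun kl => PySem.List.pyRepeat ['.'] (n - kl.1) ++ kl.2))) = _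
    have h0 : n.toNat = 0 := by omega
    rw [h0]
    simp [pvLinesN, PySem.List.pyRepeat_singleton]
    omega
  · rw [not_lt] at hn
    have aux : ∀ m : Nat,
        (PySem.List.pyRange 1 ((m : Int) + 1) 1).foldl
          (fun lines k =>
            let edge := (k, ['O'] ++ PySem.List.pyRepeat ['.'] (2 * k - 1) ++ ['O'])
            [edge] ++ lines ++ [edge])
          [(0, ['O'])] = pvRings m := by
      intro m
      induction m with
      | zero => simp [PySem.List.pyRange_one_eq_nil, pvRings]
      | succ m ih =>
          have hsplit : PySem.List.pyRange 1 ((m : Int) + 1 + 1) 1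
              = PySem.List.pyRange 1 ((m : Int) + 1) 1 ++ [(m : Int) + 1] :=
            PySem.List.pyRange_one_succ_right (by omega)
          rw [show ((m + 1 : Nat) : Int) + 1 = (m : Int) + 1 + 1 by push_cast; ring,
            hsplit, List.foldl_append, ih]
          have he : (2 * ((m : Int) + 1) - 1).toNat = 2 * (m + 1) - 1 := by omega
          simp only [List.foldl_cons, List.foldl_nil, pvRings, pvEdgeN,
            PySem.List.pyRepeat_singleton, he]
    have h := aux n.toNat
    rw [Int.toNat_of_nonneg hn] at h
    rw [h]
    show String.ofList (PySem.Chars.join ['\n']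
        ((pvRings n.toNat).map
          (fun kl => PySem.List.pyRepeat ['.'] (n - kl.1) ++ kl.2))) = _
    rw [show (fun kl : Int × List Char => PySem.List.pyRepeat ['.'] (n - kl.1) ++ kl.2)
        = (fun kl : Int × List Char =>
            PySem.List.pyRepeat ['.'] ((n.toNat : Int) - kl.1) ++ kl.2) by
      rw [Int.toNat_of_nonneg hn]]
    rw [pv_map_rings]

-- ===== VERDICT (by name: the statement is the Claim_ definition above) =====
theorem vis4_spec : Claim_equal_vis4 := by
  intro n _
  show vis4 n = vis4_alt n
  rw [pv_A_join, pv_B_join]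
  by_cases hn : 0 ≤ n
  · rw [pv_rows_nat n hn, pv_mid_nat, pv_rows_eq_lines]
  · rw [not_le] at hn
    rw [PySem.List.pyRange_one_eq_nil (by omega), pv_mid_nat]
    have : n.toNat = 0 := by omega
    rw [this, ← pv_rows_eq_lines 0]
    simp [pvRowsN, pvMidN]
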